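-- pv_equiv track=rewrite | github.com/gourav-sharma1857/cipher-spry-backend | patterns.py | alphabet_reflect_by_position_new
-- ===== SOURCE A (Python) =====
-- MOD_26 = 26 # Constant for modulo 26, used for wrapping around the alphabet (A-Z)
--
-- ASCII_A_UPPER = ord('A') # ASCII value of 'A' (65), used as a base for character-to-index conversion
--
-- def reflect_char(char: str) -> str: # Function to reflect a character across the alphabet (A->Z, B->Y, etc.)
--     """Reflect a character across the alphabet (A→Z, B→Y, ..., Z→A)."""
--     if 'A' <= char <= 'Z': # Check if the character is an uppercase letter
--         original_index = ord(char) - ASCII_A_UPPER # Get the 0-25 index of the character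
--         transformed_index = MOD_26 - 1 - original_index # Calculate the reflected index (e.g., A=0 -> 25=Z, Z=25 -> 0=A)
--         return chr(ASCII_A_UPPER + transformed_index) # Convert the new index back to a character
--     return char # Return non-alphabetic characters unchanged
--
-- def alphabet_reflect_by_position_new(word: str) -> str: # Pattern: reflects letters at odd positions (1-based), leaves evens unchanged (new version)
--     """Reflect letters in odd positions (1, 3, 5) using reflect_char; even positions unchanged."""
--     if len(word) != 5: return word # Only apply if word is 5 characters long
--     transformed = [] # Initialize an empty list
--     for i, char in enumerate(word): # Iterate through characters with their 0-based index
--         if (i + 1) % 2 != 0:  # Check if the 1-based position is odd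
--             transformed.append(reflect_char(char)) # Apply reflection
--         else: # If even position, append unchanged
--             transformed.append(char)
--     return "".join(transformed) # Join the list of characters
-- ===== SOURCE B (Python) =====
-- MOD_26 = 26
-- ASCII_A_UPPER = ord('A')
--
-- def reflect_char(char: str) -> str:
--     if 'A' <= char <= 'Z':
--         return chr(ord('A') + ord('Z') - ord(char))
--     return char
--
-- def alphabet_reflect_by_position_new(word: str) -> str:
--     if len(word) != 5:
--         return word
--     odds = [reflect_char(c) for c in word[0::2]]   # positions 1,3,5 (1-based)
--     evens = list(word[1::2])                       # positions 2,4
--     return odds[0] + evens[0] + odds[1] + evens[1] + odds[2]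
-- ===== Notes on version B (the rewrite author's own statement) =====
-- stated objective: alternative
-- what changed: Replaces the single enumerate loop with a per-character parity branch by two strided slices (word[0::2] reflected as a whole, word[1::2] untouched) that are interleaved back into the 5-char result.
import Mathlib
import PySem

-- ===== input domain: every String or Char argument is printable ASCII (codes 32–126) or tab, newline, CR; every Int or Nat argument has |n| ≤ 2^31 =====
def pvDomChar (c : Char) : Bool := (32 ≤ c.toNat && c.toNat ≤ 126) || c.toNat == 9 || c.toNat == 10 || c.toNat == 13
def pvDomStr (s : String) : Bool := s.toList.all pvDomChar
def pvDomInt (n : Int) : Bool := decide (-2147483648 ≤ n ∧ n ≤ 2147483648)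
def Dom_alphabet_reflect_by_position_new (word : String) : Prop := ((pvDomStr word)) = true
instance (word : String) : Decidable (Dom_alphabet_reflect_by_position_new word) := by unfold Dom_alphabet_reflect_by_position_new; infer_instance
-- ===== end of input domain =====

-- B replaces A's single parity-branching loop by two strided slices (odd positions
-- reflected in one pass, even positions kept) interleaved back; alternative decomposition, same cost.


-- ===== PORT A =====
-- reflect_char from Source A: reflect an uppercase letter across the alphabet, others unchanged
def reflectChar (c : Char) : Char :=
  if 'A' ≤ c ∧ c ≤ 'Z' then
    Char.ofNat (65 + (26 - 1 - (c.toNat - 65)))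
  else c

def alphabet_reflect_by_position_new (word : String) : String :=
  if PySem.Str.len word ≠ 5 then word
  else
    let transformed := (PySem.List.enumerate word.toList).foldl
      (fun acc p =>
        if PySem.Int.mod (p.1 + 1) 2 ≠ 0 then acc ++ [reflectChar p.2]
        else acc ++ [p.2]) []
    String.ofList transformed

-- ===== PORT B =====
-- reflect_char from Source B (chr(ord('A') + ord('Z') - ord(c)))
def reflectCharB (c : Char) : Char :=
  if 'A' ≤ c ∧ c ≤ 'Z' then
    Char.ofNat (65 + 90 - c.toNat)
  else c

-- word[0::2]: every second character starting at the head (step-2 stride)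
def everyOther : List Char → List Char
  | [] => []
  | [a] => [a]
  | a :: _ :: rest => a :: everyOther rest

def alphabet_reflect_by_position_new_alt (word : String) : String :=
  if PySem.Str.len word ≠ 5 then word
  else
    let odds := (everyOther word.toList).map reflectCharB
    let evens := everyOther (word.toList.drop 1)
    String.ofList [odds.getD 0 ' ', evens.getD 0 ' ', odds.getD 1 ' ',
                   evens.getD 1 ' ', odds.getD 2 ' ']

-- ===== PRECONDITION & SPEC =====
def Spec_alphabet_reflect_by_position_new (word : String) (out : String) : Prop := out = alphabet_reflect_by_position_new_alt word
instance (word : String) (out : String) : Decidable (Spec_alphabet_reflect_by_position_new word out) := by unfold Spec_alphabet_reflect_by_position_new; infer_instance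

-- ===== CLAIM (what is proved, stated in full; the proofs are below) =====
def Claim_equal_alphabet_reflect_by_position_new : Prop := ∀ (word : String), Dom_alphabet_reflect_by_position_new word → Spec_alphabet_reflect_by_position_new word (alphabet_reflect_by_position_new word)

-- ===== LEMMAS AND PROOFS =====
theorem reflectCharB_eq (c : Char) : reflectCharB c = reflectChar c := by
  unfold reflectCharB reflectChar
  split_ifs with h
  · rcases h with ⟨h1, h2⟩
    have hA : (65 : Nat) ≤ c.toNat := h1
    have hZ : c.toNat ≤ 90 := h2
    congr 1
    omega
  · rfl

-- ===== VERDICT (by name: the statement is the Claim_ definition above) =====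
theorem alphabet_reflect_by_position_new_spec : Claim_equal_alphabet_reflect_by_position_new := by
  intro word _
  unfold Spec_alphabet_reflect_by_position_new
  unfold alphabet_reflect_by_position_new alphabet_reflect_by_position_new_alt
  by_cases h : PySem.Str.len word = 5
  · simp only [h, ne_eq, not_true_eq_false, if_false]
    have hl : word.toList.length = 5 := by
      have := PySem.Str.len_eq word
      omega
    obtain ⟨a, b, c, d, e, hw⟩ : ∃ a b c d e, word.toList = [a, b, c, d, e] := by
      match hm : word.toList, hl with
      | [a, b, c, d, e], _ => exact ⟨a, b, c, d, e, rfl⟩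
    rw [hw]
    simp [PySem.List.enumerate, PySem.Int.mod, everyOther, reflectCharB_eq]
  · have h' : ¬ ((word.length : Int) = 5) := by
      simpa [PySem.Str.len_eq] using h
    simp [h']
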